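-- pv_equiv track=rewrite | github.com/Liros999/Tools | B.sub_Analyzer/src/B_Sub2_0.py | _iupac_to_regex
-- ===== SOURCE A (Python) =====
-- def _iupac_to_regex(pattern: str) -> str:
--     """Convert IUPAC codes to regex pattern"""
--     iupac_map = {
--         'R': '[AG]',    # A or G
--         'Y': '[CT]',    # C or T
--         'S': '[GC]',    # G or C
--         'W': '[AT]',    # A or T
--         'K': '[GT]',    # G or T
--         'M': '[AC]',    # A or C
--         'B': '[CGT]',   # C or G or T
--         'D': '[AGT]',   # A or G or T
--         'H': '[ACT]',   # A or C or T
--         'V': '[ACG]',   # A or C or G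
--         'N': '[ACGT]'   # Any base
--     }
--
--     # Convert pattern to uppercase
--     pattern = pattern.upper()
--
--     # Replace IUPAC codes with regex patterns
--     for code, regex in iupac_map.items():
--         pattern = pattern.replace(code, regex)
--
--     return pattern
-- ===== SOURCE B (Python) =====
-- def _iupac_to_regex(pattern: str) -> str:
--     """Convert IUPAC codes to regex pattern: one explicit loop over the
--     characters, uppercasing each and expanding it with an if/elif chain."""
--     out = []
--     for ch in pattern:
--         c = ch.upper()
--         if c == 'R':
--             out.append('[AG]')
--         elif c == 'Y':
--             out.append('[CT]')
--         elif c == 'S':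
--             out.append('[GC]')
--         elif c == 'W':
--             out.append('[AT]')
--         elif c == 'K':
--             out.append('[GT]')
--         elif c == 'M':
--             out.append('[AC]')
--         elif c == 'B':
--             out.append('[CGT]')
--         elif c == 'D':
--             out.append('[AGT]')
--         elif c == 'H':
--             out.append('[ACT]')
--         elif c == 'V':
--             out.append('[ACG]')
--         elif c == 'N':
--             out.append('[ACGT]')
--         else:
--             out.append(c)
--     return ''.join(out)
-- ===== Notes on version B (the rewrite author's own statement) =====
-- stated objective: simpler
-- what changed: Replaced the 11 sequential whole-string replace passes over a dict with a single explicit loop over the characters that uppercases each character and expands it via an if/elif chain into an accumulator list joined at the end.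
import Mathlib
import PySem

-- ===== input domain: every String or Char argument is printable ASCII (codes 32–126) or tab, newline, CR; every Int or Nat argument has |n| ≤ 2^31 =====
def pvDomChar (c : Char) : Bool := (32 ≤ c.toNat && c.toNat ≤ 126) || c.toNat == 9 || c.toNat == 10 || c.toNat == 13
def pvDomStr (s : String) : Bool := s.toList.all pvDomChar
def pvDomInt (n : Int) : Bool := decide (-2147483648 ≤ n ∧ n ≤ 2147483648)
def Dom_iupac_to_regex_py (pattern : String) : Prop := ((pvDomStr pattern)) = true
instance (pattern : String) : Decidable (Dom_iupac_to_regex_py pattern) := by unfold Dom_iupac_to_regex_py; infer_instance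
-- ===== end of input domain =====

-- B replaces A's 11 sequential whole-string replace passes (dict iteration) by one explicit loop
-- over the characters, per-character uppercasing and an if/elif expansion chain (same return value).

-- ===== PORT A =====
def pvIupacDict : PySem.Dict String String :=
  PySem.Dict.mk [("R", "[AG]"), ("Y", "[CT]"), ("S", "[GC]"), ("W", "[AT]"),
                 ("K", "[GT]"), ("M", "[AC]"), ("B", "[CGT]"), ("D", "[AGT]"),
                 ("H", "[ACT]"), ("V", "[ACG]"), ("N", "[ACGT]")]

def iupac_to_regex_py (pattern : String) : String :=
  let pattern := PySem.Str.upper pattern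
  pvIupacDict.items.foldl (fun pattern cr => PySem.Str.replace pattern cr.1 cr.2) pattern

-- ===== PORT B =====
-- the if/elif chain of Source B, as a per-character expansion
def pvExpand (c : Char) : List Char :=
  if c = 'R' then "[AG]".toList
  else if c = 'Y' then "[CT]".toList
  else if c = 'S' then "[GC]".toList
  else if c = 'W' then "[AT]".toList
  else if c = 'K' then "[GT]".toList
  else if c = 'M' then "[AC]".toList
  else if c = 'B' then "[CGT]".toList
  else if c = 'D' then "[AGT]".toList
  else if c = 'H' then "[ACT]".toList
  else if c = 'V' then "[ACG]".toList
  else if c = 'N' then "[ACGT]".toList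
  else [c]

def iupac_to_regex_py_alt (pattern : String) : String :=
  let out := pattern.toList.foldl
    (fun out ch => out ++ [pvExpand (PySem.Chars.upperChar ch)])
    ([] : List (List Char))
  String.ofList (PySem.Chars.join [] out)

-- ===== PRECONDITION & SPEC =====
def Spec_iupac_to_regex_py (pattern : String) (out : String) : Prop := out = iupac_to_regex_py_alt pattern
instance (pattern : String) (out : String) : Decidable (Spec_iupac_to_regex_py pattern out) := by unfold Spec_iupac_to_regex_py; infer_instance

-- ===== CLAIM (what is proved, stated in full; the proofs are below) =====
def Claim_equal_iupac_to_regex_py : Prop := ∀ (pattern : String), Dom_iupac_to_regex_py pattern → Spec_iupac_to_regex_py pattern (iupac_to_regex_py pattern)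

-- ===== LEMMAS AND PROOFS =====

-- A single-character replace is a flatMap over the characters.
theorem replace_go_single (o : Char) (new : List Char) :
    ∀ (l acc : List Char),
      PySem.Chars.replace.go [o] new l.length l acc
        = acc.reverse ++ l.flatMap (fun c => if c = o then new else [c]) := by
  intro l
  induction l with
  | nil => intro acc; simp [PySem.Chars.replace.go]
  | cons c t ih =>
    intro acc
    by_cases h : c = o
    · subst h
      simp [PySem.Chars.replace.go, List.isPrefixOf, ih]
    · have hb : [o].isPrefixOf (c :: t) = false := by
        simp [List.isPrefixOf]; exact fun h' => absurd h'.symm h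
      simp [PySem.Chars.replace.go, hb, ih, h]

theorem replace_single (o : Char) (new l : List Char) :
    PySem.Chars.replace l [o] new = l.flatMap (fun c => if c = o then new else [c]) := by
  simpa using replace_go_single o new l []

-- joining on the empty separator is flattening
theorem join_empty_flatten (l : List (List Char)) :
    PySem.Chars.join [] l = l.flatten := by
  show (List.intersperse ([] : List Char) l).flatten = l.flatten
  induction l with
  | nil => rfl
  | cons x t ih =>
    cases t with
    | nil => rfl
    | cons y t' => simpa [List.intersperse] using ih

-- Source B's append loop builds the map of the expansion over the characters
theorem foldl_append_map {α β : Type} (f : α → β) (l : List α) (acc : List β) :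
    l.foldl (fun out ch => out ++ [f ch]) acc = acc ++ l.map f := by
  induction l generalizing acc with
  | nil => simp
  | cons c t ih => simp [ih]

-- ===== VERDICT (by name: the statement is the Claim_ definition above) =====
set_option maxHeartbeats 2000000 in
theorem iupac_to_regex_py_spec : Claim_equal_iupac_to_regex_py := by
  intro pattern _
  show iupac_to_regex_py pattern = iupac_to_regex_py_alt pattern
  apply String.toList_injective
  unfold iupac_to_regex_py iupac_to_regex_py_alt
  rw [String.toList_ofList, foldl_append_map, List.nil_append, join_empty_flatten,
     List.flatten_eq_flatMap, List.flatMap_map]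
  simp only [pvIupacDict, List.foldl_cons, List.foldl_nil]
  simp only [PySem.Str.toList_replace]
  rw [show ("R".toList) = ['R'] from rfl, show ("Y".toList) = ['Y'] from rfl,
     show ("S".toList) = ['S'] from rfl, show ("W".toList) = ['W'] from rfl,
     show ("K".toList) = ['K'] from rfl, show ("M".toList) = ['M'] from rfl,
     show ("B".toList) = ['B'] from rfl, show ("D".toList) = ['D'] from rfl,
     show ("H".toList) = ['H'] from rfl, show ("V".toList) = ['V'] from rfl,
     show ("N".toList) = ['N'] from rfl]
  simp only [replace_single]
  simp only [List.flatMap_assoc]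
  rw [show (PySem.Str.upper pattern).toList = pattern.toList.map PySem.Chars.upperChar by
        simp [PySem.Str.toList_upper, PySem.Chars.upper]]
  rw [List.flatMap_map]
  apply List.flatMap_congr
  intro ch _
  generalize PySem.Chars.upperChar ch = c
  by_cases hR : c = 'R'; · subst hR; decide
  by_cases hY : c = 'Y'; · subst hY; decide
  by_cases hS : c = 'S'; · subst hS; decide
  by_cases hW : c = 'W'; · subst hW; decide
  by_cases hK : c = 'K'; · subst hK; decide
  by_cases hM : c = 'M'; · subst hM; decide
  by_cases hB : c = 'B'; · subst hB; decide
  by_cases hD : c = 'D'; · subst hD; decide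
  by_cases hH : c = 'H'; · subst hH; decide
  by_cases hV : c = 'V'; · subst hV; decide
  by_cases hN : c = 'N'; · subst hN; decide
  simp [pvExpand, hR, hY, hS, hW, hK, hM, hB, hD, hH, hV, hN]
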